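-- pv_equiv track=rewrite | github.com/nttpavankumargupta/nttcapstoneproject | src/node/answer_eval_nodes.py | _parse_aggregation
-- ===== SOURCE A (Python) =====
-- def _parse_aggregation(content: str) -> tuple:
--     """Parse aggregated results from LLM response"""
--     lines = content.split('\n')
--
--     strong_areas = []
--     weak_areas = []
--     practical_skills = []
--     missing_skills = []
--
--     current_section = None
--
--     for line in lines:
--         line = line.strip()
--         if not line:
--             continue
--
--         if 'STRONG_AREAS' in line:
--             current_section = 'strong'
--         elif 'WEAK_AREAS' in line:
--             current_section = 'weak'
--         elif 'PRACTICAL_SKILLS_DEMONSTRATED' in line: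
--             current_section = 'practical'
--         elif 'MISSING_PRACTICAL_SKILLS' in line:
--             current_section = 'missing'
--         elif line.startswith('-') or line.startswith('•'):
--             item = line.lstrip('-•').strip()
--             if current_section == 'strong':
--                 strong_areas.append(item)
--             elif current_section == 'weak':
--                 weak_areas.append(item)
--             elif current_section == 'practical':
--                 practical_skills.append(item)
--             elif current_section == 'missing':
--                 missing_skills.append(item)
--
--     return (
--         strong_areas if strong_areas else ["General understanding"],
--         weak_areas if weak_areas else ["Needs more practical experience"],
--         practical_skills if practical_skills else ["Basic skills"],
--         missing_skills if missing_skills else ["Advanced practical skills"]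
--     )
-- ===== SOURCE B (Python) =====
-- def _parse_aggregation(content: str) -> tuple:
--     """Reverse traversal: walk the lines from the END, accumulating bullets in a
--     'pending' list; on meeting a header, the pending bullets belong to it (the
--     nearest preceding header in the original order), so flush them onto the
--     front of that section's bucket.  Pending bullets left over at the start
--     (bullets before any header) are discarded."""
--     keys = ['STRONG_AREAS', 'WEAK_AREAS',
--             'PRACTICAL_SKILLS_DEMONSTRATED', 'MISSING_PRACTICAL_SKILLS']
--     buckets = [[], [], [], []]
--     pending = []
--     for raw in reversed(content.split('\n')):
--         line = raw.strip()
--         if not line: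
--             continue
--         tag = next((i for i, k in enumerate(keys) if k in line), None)
--         if tag is not None:
--             buckets[tag] = pending + buckets[tag]
--             pending = []
--         elif line.startswith(('-', '•')):
--             pending = [line.lstrip('-•').strip()] + pending
--     defaults = (["General understanding"], ["Needs more practical experience"],
--                 ["Basic skills"], ["Advanced practical skills"])
--     return tuple(b or d for b, d in zip(buckets, defaults))
-- ===== Notes on version B (the rewrite author's own statement) =====
-- stated objective: alternative
-- what changed: Replaces A's forward flag-driven state machine (current_section decides where each bullet goes) by a reverse traversal: bullets are collected into a pending list while walking the lines from the end, and flushed onto a section's bucket when its header (the nearest preceding header) is reached; leftover pending bullets are discarded.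
import Mathlib
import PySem

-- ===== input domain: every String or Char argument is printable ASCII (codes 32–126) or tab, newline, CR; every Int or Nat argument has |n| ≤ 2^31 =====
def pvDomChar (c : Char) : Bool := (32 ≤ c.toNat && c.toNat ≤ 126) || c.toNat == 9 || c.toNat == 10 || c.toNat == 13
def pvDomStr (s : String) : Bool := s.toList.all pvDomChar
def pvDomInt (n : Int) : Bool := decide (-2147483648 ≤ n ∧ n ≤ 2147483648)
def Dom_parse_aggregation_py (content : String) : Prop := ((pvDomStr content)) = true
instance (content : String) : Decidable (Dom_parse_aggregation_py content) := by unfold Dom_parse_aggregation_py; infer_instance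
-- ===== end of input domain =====

-- B replaces A's forward current-section state machine by a reverse traversal with a
-- pending-bullets accumulator (bullets flushed when their nearest preceding header is
-- met); same return value, objective: alternative.

-- ===== PORT A =====

-- hand port of line.lstrip('-•'): drop leading characters from the set {'-','•'} (exact)
def pvLstripBullets (s : String) : String :=
  String.ofList (s.toList.dropWhile (fun c => c == '-' || c == '•'))

-- one iteration of A's for-loop: state = (current_section, strong, weak, practical, missing)
def pvStepA (st : Option String × List String × List String × List String × List String)
    (raw : String) : Option String × List String × List String × List String × List String :=
  let line := PySem.Str.strip raw
  if line.toList = [] then st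
  else if PySem.Str.isIn "STRONG_AREAS" line then (some "strong", st.2)
  else if PySem.Str.isIn "WEAK_AREAS" line then (some "weak", st.2)
  else if PySem.Str.isIn "PRACTICAL_SKILLS_DEMONSTRATED" line then (some "practical", st.2)
  else if PySem.Str.isIn "MISSING_PRACTICAL_SKILLS" line then (some "missing", st.2)
  else if PySem.Str.startswith line "-" || PySem.Str.startswith line "•" then
    let item := PySem.Str.strip (pvLstripBullets line)
    if st.1 = some "strong" then (st.1, st.2.1 ++ [item], st.2.2)
    else if st.1 = some "weak" then (st.1, st.2.1, st.2.2.1 ++ [item], st.2.2.2)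
    else if st.1 = some "practical" then (st.1, st.2.1, st.2.2.1, st.2.2.2.1 ++ [item], st.2.2.2.2)
    else if st.1 = some "missing" then (st.1, st.2.1, st.2.2.1, st.2.2.2.1, st.2.2.2.2 ++ [item])
    else st
  else st

def parse_aggregation_py (content : String) : List String × List String × List String × List String :=
  -- split('\n'): sep ≠ "" so split? returns some; .getD [] is never taken
  let lines := (PySem.Str.split? content "\n").getD []
  let st := lines.foldl pvStepA (none, [], [], [], [])
  ((if st.2.1 = [] then ["General understanding"] else st.2.1),
   (if st.2.2.1 = [] then ["Needs more practical experience"] else st.2.2.1),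
   (if st.2.2.2.1 = [] then ["Basic skills"] else st.2.2.2.1),
   (if st.2.2.2.2 = [] then ["Advanced practical skills"] else st.2.2.2.2))

-- ===== PORT B =====

-- one iteration of B's reverse loop: state = (buckets, pending).
-- Source B's 'next((i for i, k in enumerate(keys) if k in line), None)' is the first match
-- over the ordered key list, transliterated as the same ordered chain of 'in' tests;
-- 'buckets[tag] = pending + buckets[tag]' is written out per tag.
def pvStepB (st : (List String × List String × List String × List String) × List String)
    (raw : String) : (List String × List String × List String × List String) × List String :=
  let line := PySem.Str.strip raw
  if line.toList = [] then st
  else if PySem.Str.isIn "STRONG_AREAS" line then ((st.2 ++ st.1.1, st.1.2), [])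
  else if PySem.Str.isIn "WEAK_AREAS" line then ((st.1.1, st.2 ++ st.1.2.1, st.1.2.2), [])
  else if PySem.Str.isIn "PRACTICAL_SKILLS_DEMONSTRATED" line then
    ((st.1.1, st.1.2.1, st.2 ++ st.1.2.2.1, st.1.2.2.2), [])
  else if PySem.Str.isIn "MISSING_PRACTICAL_SKILLS" line then
    ((st.1.1, st.1.2.1, st.1.2.2.1, st.2 ++ st.1.2.2.2), [])
  else if PySem.Str.startswith line "-" || PySem.Str.startswith line "•" then
    (st.1, PySem.Str.strip (pvLstripBullets line) :: st.2)
  else st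

def parse_aggregation_py_alt (content : String) : List String × List String × List String × List String :=
  let lines := (PySem.Str.split? content "\n").getD []
  -- 'for raw in reversed(lines)': fold over the reversed line list
  let st := lines.reverse.foldl pvStepB (([], [], [], []), [])
  ((if st.1.1 = [] then ["General understanding"] else st.1.1),
   (if st.1.2.1 = [] then ["Needs more practical experience"] else st.1.2.1),
   (if st.1.2.2.1 = [] then ["Basic skills"] else st.1.2.2.1),
   (if st.1.2.2.2 = [] then ["Advanced practical skills"] else st.1.2.2.2))

-- ===== PRECONDITION & SPEC =====
def Spec_parse_aggregation_py (content : String) (out : List String × List String × List String × List String) : Prop := out = parse_aggregation_py_alt content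
instance (content : String) (out : List String × List String × List String × List String) : Decidable (Spec_parse_aggregation_py content out) := by unfold Spec_parse_aggregation_py; infer_instance

-- ===== CLAIM (what is proved, stated in full; the proofs are below) =====
def Claim_equal_parse_aggregation_py : Prop := ∀ (content : String), Dom_parse_aggregation_py content → Spec_parse_aggregation_py content (parse_aggregation_py content)

-- ===== LEMMAS AND PROOFS =====

-- componentwise append of bucket 4-tuples
def pvBapp (a b : List String × List String × List String × List String) :
    List String × List String × List String × List String :=
  (a.1 ++ b.1, a.2.1 ++ b.2.1, a.2.2.1 ++ b.2.2.1, a.2.2.2 ++ b.2.2.2)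

-- prepend pd onto bucket t
def pvUpd (t : Nat) (pd : List String) (b : List String × List String × List String × List String) :
    List String × List String × List String × List String :=
  match t with
  | 0 => (pd ++ b.1, b.2)
  | 1 => (b.1, pd ++ b.2.1, b.2.2)
  | 2 => (b.1, b.2.1, pd ++ b.2.2.1, b.2.2.2)
  | _ => (b.1, b.2.1, b.2.2.1, pd ++ b.2.2.2)

-- B's reverse fold, as a function of the (un-reversed) line list
def pvBfun (xs : List String) :
    (List String × List String × List String × List String) × List String :=
  xs.reverse.foldl pvStepB (([], [], [], []), [])

theorem pvBfun_cons (x : String) (xs : List String) :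
    pvBfun (x :: xs) = pvStepB (pvBfun xs) x := by
  simp [pvBfun, List.reverse_cons, List.foldl_append]

-- the bridge: A's forward fold (from each reachable section state and any initial
-- buckets) computed from B's reverse fold
theorem pvMain (xs : List String) :
    (∀ b, (xs.foldl pvStepA (none, b)).2 = pvBapp b (pvBfun xs).1) ∧
    (∀ b, (xs.foldl pvStepA (some "strong", b)).2 = pvBapp b (pvUpd 0 (pvBfun xs).2 (pvBfun xs).1)) ∧
    (∀ b, (xs.foldl pvStepA (some "weak", b)).2 = pvBapp b (pvUpd 1 (pvBfun xs).2 (pvBfun xs).1)) ∧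
    (∀ b, (xs.foldl pvStepA (some "practical", b)).2 = pvBapp b (pvUpd 2 (pvBfun xs).2 (pvBfun xs).1)) ∧
    (∀ b, (xs.foldl pvStepA (some "missing", b)).2 = pvBapp b (pvUpd 3 (pvBfun xs).2 (pvBfun xs).1)) := by
  induction xs with
  | nil =>
      refine ⟨?_, ?_, ?_, ?_, ?_⟩ <;> intro b <;>
        rcases b with ⟨b1, b2, b3, b4⟩ <;> simp [pvBfun, pvUpd, pvBapp]
  | cons x xs ih =>
      obtain ⟨i0, i1, i2, i3, i4⟩ := ih
      rw [pvBfun_cons]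
      rcases hE : pvBfun xs with ⟨⟨a1, a2, a3, a4⟩, pd⟩
      rw [hE] at i0 i1 i2 i3 i4
      simp only [pvUpd, pvBapp] at i0 i1 i2 i3 i4
      by_cases hb : PySem.Chars.strip x.toList = []
      · refine ⟨?_, ?_, ?_, ?_, ?_⟩ <;> intro b <;> rcases b with ⟨b1, b2, b3, b4⟩ <;>
          simp only [List.foldl_cons] <;>
          simp [pvStepA, pvStepB, hb, pvUpd, pvBapp, i0, i1, i2, i3, i4]
      · by_cases h0 : PySem.Chars.isIn ['S', 'T', 'R', 'O', 'N', 'G', '_', 'A', 'R', 'E', 'A', 'S'] (PySem.Chars.strip x.toList) = true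
        · refine ⟨?_, ?_, ?_, ?_, ?_⟩ <;> intro b <;> rcases b with ⟨b1, b2, b3, b4⟩ <;>
            simp only [List.foldl_cons] <;>
            simp [pvStepA, pvStepB, hb, h0, pvUpd, pvBapp, i1]
        · by_cases h1 : PySem.Chars.isIn ['W', 'E', 'A', 'K', '_', 'A', 'R', 'E', 'A', 'S'] (PySem.Chars.strip x.toList) = true
          · refine ⟨?_, ?_, ?_, ?_, ?_⟩ <;> intro b <;> rcases b with ⟨b1, b2, b3, b4⟩ <;>
              simp only [List.foldl_cons] <;>
              simp [pvStepA, pvStepB, hb, h0, h1, pvUpd, pvBapp, i2]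
          · by_cases h2 : PySem.Chars.isIn ['P', 'R', 'A', 'C', 'T', 'I', 'C', 'A', 'L', '_', 'S', 'K', 'I', 'L', 'L', 'S', '_', 'D', 'E', 'M', 'O', 'N', 'S', 'T', 'R', 'A', 'T', 'E', 'D'] (PySem.Chars.strip x.toList) = true
            · refine ⟨?_, ?_, ?_, ?_, ?_⟩ <;> intro b <;> rcases b with ⟨b1, b2, b3, b4⟩ <;>
                simp only [List.foldl_cons] <;>
                simp [pvStepA, pvStepB, hb, h0, h1, h2, pvUpd, pvBapp, i3]
            · by_cases h3 : PySem.Chars.isIn ['M', 'I', 'S', 'S', 'I', 'N', 'G', '_', 'P', 'R', 'A', 'C', 'T', 'I', 'C', 'A', 'L', '_', 'S', 'K', 'I', 'L', 'L', 'S'] (PySem.Chars.strip x.toList) = true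
              · refine ⟨?_, ?_, ?_, ?_, ?_⟩ <;> intro b <;> rcases b with ⟨b1, b2, b3, b4⟩ <;>
                  simp only [List.foldl_cons] <;>
                  simp [pvStepA, pvStepB, hb, h0, h1, h2, h3, pvUpd, pvBapp, i4]
              · by_cases h4 : (PySem.Chars.startswith (PySem.Chars.strip x.toList) ['-'] = true ∨
                    PySem.Chars.startswith (PySem.Chars.strip x.toList) ['•'] = true)
                · refine ⟨?_, ?_, ?_, ?_, ?_⟩ <;> intro b <;> rcases b with ⟨b1, b2, b3, b4⟩ <;>
                    simp only [List.foldl_cons] <;>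
                    simp [pvStepA, pvStepB, hb, h0, h1, h2, h3, h4, pvUpd, pvBapp,
                      i0, i1, i2, i3, i4, List.append_assoc]
                · refine ⟨?_, ?_, ?_, ?_, ?_⟩ <;> intro b <;> rcases b with ⟨b1, b2, b3, b4⟩ <;>
                    simp only [List.foldl_cons] <;>
                    simp [pvStepA, pvStepB, hb, h0, h1, h2, h3, h4, pvUpd, pvBapp,
                      i0, i1, i2, i3, i4]

-- ===== VERDICT (by name: the statement is the Claim_ definition above) =====
theorem parse_aggregation_py_spec : Claim_equal_parse_aggregation_py := by
  intro content _
  unfold Spec_parse_aggregation_py parse_aggregation_py parse_aggregation_py_alt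
  have h := (pvMain ((PySem.Str.split? content "\n").getD [])).1 ([], [], [], [])
  rw [pvBfun] at h
  simp only [pvBapp, List.nil_append] at h
  simp only [h]
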